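-- pv_equiv track=rewrite | github.com/jonathf/matlab2cpp | matlab2cpp/datatype.py | get_mem
-- ===== SOURCE A (Python) =====
-- mem0 = {"uword", "uvec", "urowvec", "umat", "ucube"}
--
-- mem1 = {"int", "ivec", "irowvec", "imat", "icube"}
--
-- mem2 = {"float", "fvec", "frowvec", "fmat", "fcube"}
--
-- mem3 = {"double", "vec", "rowvec", "mat", "cube"}
--
-- mem4 = {"cx_double", "cx_vec", "cx_rowvec", "cx_mat", "cx_cube"}
--
-- others = {"char", "string", "TYPE", "func_lambda", "struct", "structs", "cell",
--         "wall_clock"}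
--
-- def get_mem(val):
--
--     while val[-1] == "*":
--         val = val[:-1]
--
--     if val in mem0:    mem = 0
--     elif val in mem1:  mem = 1
--     elif val in mem2:  mem = 2
--     elif val in mem3:  mem = 3
--     elif val in mem4:  mem = 4
--     elif val in others: mem = None
--     else:
--         raise ValueError("%s not recognized" % val)
--
--     return mem
-- ===== SOURCE B (Python) =====
-- # B decodes a type name structurally: scalar-prefix + container-shape suffix,
-- # instead of membership tests in five flat name sets.
--
-- _SCALARS = {"uword": 0, "int": 1, "float": 2, "double": 3, "cx_double": 4}
-- _PREFIXES = {"u": 0, "i": 1, "f": 2, "": 3, "cx_": 4}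
-- _SHAPES = ("rowvec", "vec", "mat", "cube")  # longest first so "rowvec" is not read as "vec"
-- _OTHERS = {"char", "string", "TYPE", "func_lambda", "struct", "structs", "cell",
--            "wall_clock"}
--
--
-- def get_mem(val):
--     while val[-1] == "*":
--         val = val[:-1]
--     if val in _OTHERS:
--         return None
--     if val in _SCALARS:
--         return _SCALARS[val]
--     for shape in _SHAPES:
--         if val.endswith(shape):
--             code = _PREFIXES.get(val[:-len(shape)])
--             if code is not None:
--                 return code
--             break
--     raise ValueError("%s not recognized" % val)
-- ===== Notes on version B (the rewrite author's own statement) =====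
-- stated objective: alternative
-- what changed: Instead of testing membership in five flat name sets, B decodes the name structurally: a small scalar table for full scalar names, then a longest-first container-shape suffix match (rowvec/vec/mat/cube) whose remaining prefix (u/i/f/''/cx_) determines the code; the star-stripping while loop is kept verbatim.
import Mathlib
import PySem

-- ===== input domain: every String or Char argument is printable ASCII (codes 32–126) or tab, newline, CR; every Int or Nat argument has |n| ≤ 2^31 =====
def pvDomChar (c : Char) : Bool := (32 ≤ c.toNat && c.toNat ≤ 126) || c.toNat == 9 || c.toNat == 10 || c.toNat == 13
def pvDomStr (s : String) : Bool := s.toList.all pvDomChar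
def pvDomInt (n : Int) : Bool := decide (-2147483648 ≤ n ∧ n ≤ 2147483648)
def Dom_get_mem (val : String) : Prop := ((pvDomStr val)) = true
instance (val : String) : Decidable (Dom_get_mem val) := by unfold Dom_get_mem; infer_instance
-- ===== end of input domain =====

-- ===== PORT A =====
-- B decodes the type name structurally (scalar prefix + container-shape suffix) instead of
-- A's six flat set-membership branches (objective: alternative).
-- Both A and B raise on empty/star-only input (IndexError) and on unrecognised names (ValueError);
-- Pre_ excludes exactly those inputs.

-- `while val[-1] == "*": val = val[:-1]` (on nonempty input; [] maps to [], which Pre_ excludes)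
def stripStarsA (l : List Char) : List Char :=
  match l with
  | [] => []
  | c :: cs =>
    if (c :: cs).getLast? = some '*' then stripStarsA (c :: cs).dropLast else c :: cs
termination_by l.length
decreasing_by simp [List.length_dropLast]

def memSet0A : List (List Char) := ["uword".toList, "uvec".toList, "urowvec".toList, "umat".toList, "ucube".toList]
def memSet1A : List (List Char) := ["int".toList, "ivec".toList, "irowvec".toList, "imat".toList, "icube".toList]
def memSet2A : List (List Char) := ["float".toList, "fvec".toList, "frowvec".toList, "fmat".toList, "fcube".toList]
def memSet3A : List (List Char) := ["double".toList, "vec".toList, "rowvec".toList, "mat".toList, "cube".toList]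
def memSet4A : List (List Char) := ["cx_double".toList, "cx_vec".toList, "cx_rowvec".toList, "cx_mat".toList, "cx_cube".toList]
def othersA : List (List Char) := ["char".toList, "string".toList, "TYPE".toList, "func_lambda".toList, "struct".toList, "structs".toList, "cell".toList, "wall_clock".toList]

-- the if/elif chain; the final `raise ValueError` branch is outside Pre_ (arbitrary `none` there)
def get_mem (val : String) : Option Int :=
  let v := stripStarsA val.toList
  if v ∈ memSet0A then some 0
  else if v ∈ memSet1A then some 1
  else if v ∈ memSet2A then some 2
  else if v ∈ memSet3A then some 3
  else if v ∈ memSet4A then some 4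
  else if v ∈ othersA then none
  else none  -- raise ValueError: excluded by Pre_get_mem

-- ===== PORT B =====
-- the same star-stripping while loop, kept verbatim in B
def stripStarsB (l : List Char) : List Char :=
  match l with
  | [] => []
  | c :: cs =>
    if (c :: cs).getLast? = some '*' then stripStarsB (c :: cs).dropLast else c :: cs
termination_by l.length
decreasing_by simp [List.length_dropLast]

-- _SCALARS, _PREFIXES, _SHAPES (longest first), _OTHERS from Source B
def scalarsB : List (List Char × Int) :=
  [("uword".toList, 0), ("int".toList, 1), ("float".toList, 2), ("double".toList, 3), ("cx_double".toList, 4)]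
def prefixesB : List (List Char × Int) :=
  [("u".toList, 0), ("i".toList, 1), ("f".toList, 2), ([], 3), ("cx_".toList, 4)]
def shapesB : List (List Char) := ["rowvec".toList, "vec".toList, "mat".toList, "cube".toList]
def othersB : List (List Char) := ["char".toList, "string".toList, "TYPE".toList, "func_lambda".toList, "struct".toList, "structs".toList, "cell".toList, "wall_clock".toList]

-- `for shape in _SHAPES: if val.endswith(shape): … break` = first suffix match in shapesB
def get_mem_alt (val : String) : Option Int :=
  let v := stripStarsB val.toList
  if v ∈ othersB then none
  else
    match scalarsB.find? (fun p => p.1 = v) with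
    | some (_, c) => some c
    | none =>
      match shapesB.find? (fun s => s.isSuffixOf v) with
      | some s =>
        match prefixesB.find? (fun p => p.1 = v.take (v.length - s.length)) with
        | some (_, c) => some c
        | none => none  -- raise ValueError after break: excluded by Pre_get_mem
      | none => none  -- no shape matched: raise ValueError, excluded by Pre_get_mem

-- ===== PRECONDITION & SPEC =====
def recognisedNames : List (List Char) :=
  ["uword".toList, "uvec".toList, "urowvec".toList, "umat".toList, "ucube".toList,
   "int".toList, "ivec".toList, "irowvec".toList, "imat".toList, "icube".toList,
   "float".toList, "fvec".toList, "frowvec".toList, "fmat".toList, "fcube".toList,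
   "double".toList, "vec".toList, "rowvec".toList, "mat".toList, "cube".toList,
   "cx_double".toList, "cx_vec".toList, "cx_rowvec".toList, "cx_mat".toList, "cx_cube".toList,
   "char".toList, "string".toList, "TYPE".toList, "func_lambda".toList, "struct".toList, "structs".toList, "cell".toList, "wall_clock".toList]

-- Pre_ admits exactly the inputs on which A returns: a recognised type name followed by zero or
-- more '*' (otherwise A raises: IndexError when no non-star character exists, ValueError on unknown names).
def Pre_get_mem (val : String) : Prop :=
  ∃ n ∈ recognisedNames, val.toList = n ++ List.replicate (val.toList.length - n.length) '*'
instance (val : String) : Decidable (Pre_get_mem val) := by unfold Pre_get_mem; infer_instance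
def pvWitness_get_mem : String := "imat*"

def Spec_get_mem (val : String) (out : Option Int) : Prop := out = get_mem_alt val
instance (val : String) (out : Option Int) : Decidable (Spec_get_mem val out) := by unfold Spec_get_mem; infer_instance

-- ===== CLAIM (what is proved, stated in full; the proofs are below) =====
def Claim_equal_get_mem : Prop := ∀ (val : String), Dom_get_mem val → Pre_get_mem val → Spec_get_mem val (get_mem val)

-- ===== LEMMAS AND PROOFS =====
theorem stripB_eq_A (l : List Char) : stripStarsB l = stripStarsA l := by
  induction l using stripStarsB.induct with
  | case1 => simp [stripStarsB, stripStarsA]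
  | case2 c cs h ih => rw [stripStarsB, stripStarsA]; simp only [h, if_true]; exact ih
  | case3 c cs h => rw [stripStarsB, stripStarsA]; simp only [h, if_false]

theorem stripA_unfold (l : List Char) :
    stripStarsA l = if l.getLast? = some '*' then stripStarsA l.dropLast else l := by
  cases l with
  | nil => simp [stripStarsA]
  | cons c cs => rw [stripStarsA]

theorem stripA_append_replicate (k : Nat) (n : List Char) (h : n.getLast? ≠ some '*') :
    stripStarsA (n ++ List.replicate k '*') = n := by
  induction k with
  | zero => rw [List.replicate_zero, List.append_nil, stripA_unfold]; simp [h]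
  | succ k ih =>
    rw [stripA_unfold]
    have hr : List.replicate (k + 1) '*' = List.replicate k '*' ++ ['*'] :=
      List.replicate_succ' ..
    have h1 : (n ++ List.replicate (k + 1) '*').getLast? = some '*' := by
      rw [hr, ← List.append_assoc]; simp
    have h2 : (n ++ List.replicate (k + 1) '*').dropLast = n ++ List.replicate k '*' := by
      rw [hr, ← List.append_assoc, List.dropLast_concat]
    rw [h1, h2]
    simpa using ih

theorem recognised_no_star (n : List Char) (hn : n ∈ recognisedNames) :
    n.getLast? ≠ some '*' := by fin_cases hn <;> decide

-- on every recognised core name the membership chain and the prefix/suffix decoder agree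
theorem classify_agree (v : List Char) (hv : v ∈ recognisedNames) :
    (if v ∈ memSet0A then some (0 : Int)
     else if v ∈ memSet1A then some 1
     else if v ∈ memSet2A then some 2
     else if v ∈ memSet3A then some 3
     else if v ∈ memSet4A then some 4
     else if v ∈ othersA then none
     else none) =
    (if v ∈ othersB then none
     else
       match scalarsB.find? (fun p => p.1 = v) with
       | some (_, c) => some c
       | none =>
         match shapesB.find? (fun s => s.isSuffixOf v) with
         | some s =>
           match prefixesB.find? (fun p => p.1 = v.take (v.length - s.length)) with
           | some (_, c) => some c
           | none => none
         | none => none) := by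
  fin_cases hv <;> decide

-- ===== VERDICT (by name: the statement is the Claim_ definition above) =====
theorem get_mem_spec : Claim_equal_get_mem := by
  intro val _ hpre
  obtain ⟨n, hn, hk⟩ := hpre
  unfold Spec_get_mem get_mem get_mem_alt
  rw [stripB_eq_A, hk, stripA_append_replicate _ _ (recognised_no_star n hn)]
  exact classify_agree n hn
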